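-- pv_equiv track=rewrite | github.com/JJLLWW/google_kick_start | 2013/roundA/task3.py | solve_prob1
-- ===== SOURCE A (Python) =====
-- def solve_prob1(n):
--     # if n = 100101 in binary, this corresponds to LLRLR in the tree, non-leading digit 0 => L, 1 => R.
--     moves = []
--     while n > 1:
--         if n%2 == 0:
--             moves.append("L")
--         else:
--             moves.append("R")
--         n//=2
--     moves.reverse()
--     p, q = 1, 1
--     for move in moves:
--         p_old, q_old = p, q
--         if move == "L":
--             p, q = p_old, p_old + q_old
--         elif move == "R":
--             p, q = p_old + q_old, q_old
--     return p, q
-- ===== SOURCE B (Python) =====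
-- def solve_prob1(n):
--     # Same Stern-Brocot walk, but the move bits are processed in maximal runs:
--     # a run of k L-moves is q += k*p, a run of k R-moves is p += k*q.
--     bits = []
--     while n > 1:
--         bits.append(n % 2)
--         n //= 2
--     bits.reverse()
--
--     def group(bs):
--         if not bs:
--             return []
--         rest = group(bs[1:])
--         if rest and rest[0][0] == bs[0]:
--             return [(bs[0], rest[0][1] + 1)] + rest[1:]
--         return [(bs[0], 1)] + rest
--
--     p, q = 1, 1
--     for b, k in group(bits):
--         if b == 0:
--             q += k * p
--         else:
--             p += k * q
--     return p, q
-- ===== Notes on version B (the rewrite author's own statement) =====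
-- stated objective: alternative
-- what changed: B replaces A's per-bit (p,q) update with a run-length decomposition: the move bits are grouped into maximal runs and each run of k identical moves is applied at once as q += k*p (L) or p += k*q (R).
import Mathlib
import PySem

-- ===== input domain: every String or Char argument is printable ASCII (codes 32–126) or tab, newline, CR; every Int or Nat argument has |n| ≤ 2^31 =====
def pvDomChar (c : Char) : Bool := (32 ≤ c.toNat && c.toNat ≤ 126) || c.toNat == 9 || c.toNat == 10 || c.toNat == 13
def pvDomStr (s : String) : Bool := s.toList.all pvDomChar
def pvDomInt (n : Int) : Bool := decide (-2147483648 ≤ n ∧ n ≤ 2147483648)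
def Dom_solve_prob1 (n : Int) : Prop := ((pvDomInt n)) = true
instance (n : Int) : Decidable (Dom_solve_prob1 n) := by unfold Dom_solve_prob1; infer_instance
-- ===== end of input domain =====

-- B applies the Stern-Brocot move bits in maximal runs (q += k*p / p += k*q) instead of A's per-bit updates; alternative decomposition, same cost.


-- ===== PORT A =====
-- the while loop building `moves` (append order, LSB first)
def pvMovesA (n : Int) : List String :=
  if h : n > 1 then
    (if PySem.Int.mod n 2 == 0 then "L" else "R") :: pvMovesA (PySem.Int.floordiv n 2)
  else []
termination_by n.toNat
decreasing_by
  have : PySem.Int.floordiv n 2 = n / 2 := PySem.Int.floordiv_eq_ediv_of_pos (by omega)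
  rw [this]; omega

-- the per-move body of A's for loop
def pvStepA (pq : Int × Int) (move : String) : Int × Int :=
  if move == "L" then (pq.1, pq.1 + pq.2)
  else if move == "R" then (pq.1 + pq.2, pq.2)
  else pq

def solve_prob1 (n : Int) : Int × Int :=
  ((pvMovesA n).reverse).foldl pvStepA (1, 1)

-- ===== PORT B =====
-- the while loop building `bits` (append order, LSB first)
def pvBitsB (n : Int) : List Int :=
  if h : n > 1 then PySem.Int.mod n 2 :: pvBitsB (PySem.Int.floordiv n 2) else []
termination_by n.toNat
decreasing_by
  have : PySem.Int.floordiv n 2 = n / 2 := PySem.Int.floordiv_eq_ediv_of_pos (by omega)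
  rw [this]; omega

-- Source B's recursive `group`: maximal runs (bit, run length)
def pvGroupB : List Int → List (Int × Int)
  | [] => []
  | b :: t =>
    match pvGroupB t with
    | (b', k) :: rest => if b' == b then (b, k + 1) :: rest else (b, 1) :: (b', k) :: rest
    | [] => [(b, 1)]

-- the per-run body of B's for loop
def pvRunStepB (pq : Int × Int) (r : Int × Int) : Int × Int :=
  if r.1 == 0 then (pq.1, pq.2 + r.2 * pq.1) else (pq.1 + r.2 * pq.2, pq.2)

def solve_prob1_alt (n : Int) : Int × Int :=
  (pvGroupB ((pvBitsB n).reverse)).foldl pvRunStepB (1, 1)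

-- ===== PRECONDITION & SPEC =====
def Spec_solve_prob1 (n : Int) (out : Int × Int) : Prop := out = solve_prob1_alt n
instance (n : Int) (out : Int × Int) : Decidable (Spec_solve_prob1 n out) := by unfold Spec_solve_prob1; infer_instance

-- ===== CLAIM (what is proved, stated in full; the proofs are below) =====
def Claim_equal_solve_prob1 : Prop := ∀ (n : Int), Dom_solve_prob1 n → Spec_solve_prob1 n (solve_prob1 n)

-- ===== LEMMAS AND PROOFS =====
-- per-bit step, the bridge between the two ports
def pvStepBit (pq : Int × Int) (b : Int) : Int × Int :=
  if b == 0 then (pq.1, pq.1 + pq.2) else (pq.1 + pq.2, pq.2)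

def pvEnc (b : Int) : String := if b == 0 then "L" else "R"

theorem movesA_eq_map (n : Int) : pvMovesA n = (pvBitsB n).map pvEnc := by
  unfold pvMovesA pvBitsB
  split
  · rename_i h
    rw [movesA_eq_map (PySem.Int.floordiv n 2)]
    simp [pvEnc, List.map]
  · simp
termination_by n.toNat
decreasing_by
  have : PySem.Int.floordiv n 2 = n / 2 := PySem.Int.floordiv_eq_ediv_of_pos (by omega)
  rw [this]; omega

theorem foldA_eq_foldBit (l : List Int) (init : Int × Int) :
    (l.map pvEnc).foldl pvStepA init = l.foldl pvStepBit init := by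
  induction l generalizing init with
  | nil => rfl
  | cons b t ih =>
    simp only [List.map, List.foldl]
    rw [ih]
    congr 1
    by_cases hb : b = 0 <;> simp [pvEnc, pvStepA, pvStepBit, hb]

theorem runStep_one (init : Int × Int) (b : Int) :
    pvRunStepB init (b, 1) = pvStepBit init b := by
  obtain ⟨p, q⟩ := init
  by_cases hb : b = 0 <;> simp [pvRunStepB, pvStepBit, hb] <;> ring

theorem runStep_succ (init : Int × Int) (b k : Int) :
    pvRunStepB init (b, k + 1) = pvRunStepB (pvStepBit init b) (b, k) := by
  obtain ⟨p, q⟩ := init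
  by_cases hb : b = 0 <;> simp [pvRunStepB, pvStepBit, hb] <;> ring

theorem foldRun_eq_foldBit (l : List Int) (init : Int × Int) :
    (pvGroupB l).foldl pvRunStepB init = l.foldl pvStepBit init := by
  induction l generalizing init with
  | nil => rfl
  | cons b t ih =>
    simp only [pvGroupB]
    cases hg : pvGroupB t with
    | nil =>
      have ht : ∀ i : Int × Int, t.foldl pvStepBit i = i := by
        intro i; rw [← ih i, hg]; rfl
      simp [List.foldl, ht, runStep_one]
    | cons r rest =>
      obtain ⟨b', k⟩ := r
      by_cases hb : b' = b
      · subst hb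
        simp only [beq_self_eq_true, if_true, List.foldl]
        rw [runStep_succ]
        calc rest.foldl pvRunStepB (pvRunStepB (pvStepBit init b') (b', k))
            = ((b', k) :: rest).foldl pvRunStepB (pvStepBit init b') := rfl
          _ = (pvGroupB t).foldl pvRunStepB (pvStepBit init b') := by rw [hg]
          _ = t.foldl pvStepBit (pvStepBit init b') := ih _
      · have : (b' == b) = false := by simp [hb]
        simp only [this, Bool.false_eq_true, if_false, List.foldl]
        rw [runStep_one]
        calc ((b', k) :: rest).foldl pvRunStepB (pvStepBit init b)
            = (pvGroupB t).foldl pvRunStepB (pvStepBit init b) := by rw [hg]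
          _ = t.foldl pvStepBit (pvStepBit init b) := ih _

-- ===== VERDICT (by name: the statement is the Claim_ definition above) =====
theorem solve_prob1_spec : Claim_equal_solve_prob1 := by
  intro n _
  unfold Spec_solve_prob1 solve_prob1 solve_prob1_alt
  rw [movesA_eq_map, ← List.map_reverse, foldA_eq_foldBit, foldRun_eq_foldBit]
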